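-- pv_equiv track=rewrite | github.com/thekoushikdurgas/Deloitte- | test/comprehensive_oracle_converter.py | _extract_syntax_elements
-- ===== SOURCE A (Python) =====
-- from typing import Dict, List, Any, Optional, Union, Tuple
--
-- def _extract_syntax_elements(statements: List[Dict[str, Any]]) -> Dict[str, Any]:
--     """Extract SQL syntax elements"""
--     elements = {
--         "has_if_statements": False,
--         "has_case_statements": False,
--         "has_loops": False,
--         "has_exceptions": False,
--         "has_select": False,
--         "has_insert": False,
--         "has_update": False,
--         "has_delete": False
--     }
--
--     for stmt in statements:
--         sql_upper = stmt["raw_sql"].upper()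
--         if 'IF ' in sql_upper:
--             elements["has_if_statements"] = True
--         if 'CASE ' in sql_upper:
--             elements["has_case_statements"] = True
--         if 'LOOP' in sql_upper:
--             elements["has_loops"] = True
--         if 'EXCEPTION' in sql_upper or 'RAISE' in sql_upper:
--             elements["has_exceptions"] = True
--         if 'SELECT' in sql_upper:
--             elements["has_select"] = True
--         if 'INSERT' in sql_upper:
--             elements["has_insert"] = True
--         if 'UPDATE' in sql_upper:
--             elements["has_update"] = True
--         if 'DELETE' in sql_upper:
--             elements["has_delete"] = True
--
--     return elements
-- ===== SOURCE B (Python) =====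
-- def _extract_syntax_elements(statements):
--     """Extract SQL syntax elements"""
--     text = "\n".join(stmt["raw_sql"].upper() for stmt in statements)
--     return {
--         "has_if_statements": 'IF ' in text,
--         "has_case_statements": 'CASE ' in text,
--         "has_loops": 'LOOP' in text,
--         "has_exceptions": 'EXCEPTION' in text or 'RAISE' in text,
--         "has_select": 'SELECT' in text,
--         "has_insert": 'INSERT' in text,
--         "has_update": 'UPDATE' in text,
--         "has_delete": 'DELETE' in text,
--     }
-- ===== Notes on version B (the rewrite author's own statement) =====
-- stated objective: alternative
-- what changed: Instead of looping over statements and mutating a flag dict, B joins all upper-cased statements into one newline-separated text and performs a single substring test per keyword on that combined text (correct because no keyword contains a newline, so no match can span a join boundary).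
import Mathlib
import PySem

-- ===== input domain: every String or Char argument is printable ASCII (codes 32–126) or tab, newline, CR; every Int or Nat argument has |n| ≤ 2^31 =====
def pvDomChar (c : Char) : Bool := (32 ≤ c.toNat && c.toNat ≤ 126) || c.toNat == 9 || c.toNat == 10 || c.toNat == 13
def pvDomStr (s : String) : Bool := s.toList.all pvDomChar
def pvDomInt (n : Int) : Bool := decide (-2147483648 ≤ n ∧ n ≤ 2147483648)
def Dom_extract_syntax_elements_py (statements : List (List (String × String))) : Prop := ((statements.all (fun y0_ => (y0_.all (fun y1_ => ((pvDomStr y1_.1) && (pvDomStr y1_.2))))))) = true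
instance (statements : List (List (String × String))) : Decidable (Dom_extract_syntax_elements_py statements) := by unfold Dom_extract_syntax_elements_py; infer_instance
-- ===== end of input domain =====

-- B joins all upper-cased statements into one newline-separated text and runs one substring test per keyword on it (no keyword contains '\n', so no match can span a join boundary); same cost class, different decomposition; equivalence is about the return value.

-- ===== PORT A =====
-- stmt["raw_sql"]: Pre_ guarantees the key is present, so getD with a dummy default is exact on Pre_.
def pvUpperSql (stmt : List (String × String)) : String :=
  PySem.Str.upper (PySem.Dict.getD (PySem.Dict.mk stmt) "raw_sql" "")

def pvStepA (d : PySem.Dict String Bool) (stmt : List (String × String)) : PySem.Dict String Bool :=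
  let sql_upper := pvUpperSql stmt
  let d := if PySem.Str.isIn "IF " sql_upper then d.insert "has_if_statements" true else d
  let d := if PySem.Str.isIn "CASE " sql_upper then d.insert "has_case_statements" true else d
  let d := if PySem.Str.isIn "LOOP" sql_upper then d.insert "has_loops" true else d
  let d := if PySem.Str.isIn "EXCEPTION" sql_upper || PySem.Str.isIn "RAISE" sql_upper then d.insert "has_exceptions" true else d
  let d := if PySem.Str.isIn "SELECT" sql_upper then d.insert "has_select" true else d
  let d := if PySem.Str.isIn "INSERT" sql_upper then d.insert "has_insert" true else d
  let d := if PySem.Str.isIn "UPDATE" sql_upper then d.insert "has_update" true else d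
  let d := if PySem.Str.isIn "DELETE" sql_upper then d.insert "has_delete" true else d
  d

def extract_syntax_elements_py (statements : List (List (String × String))) : List (String × Bool) :=
  (statements.foldl pvStepA (PySem.Dict.mk
    [("has_if_statements", false), ("has_case_statements", false), ("has_loops", false),
     ("has_exceptions", false), ("has_select", false), ("has_insert", false),
     ("has_update", false), ("has_delete", false)])).items

-- ===== PORT B =====
def extract_syntax_elements_py_alt (statements : List (List (String × String))) : List (String × Bool) :=
  let text := PySem.Str.join "\n" (statements.map pvUpperSql)
  [("has_if_statements", PySem.Str.isIn "IF " text),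
   ("has_case_statements", PySem.Str.isIn "CASE " text),
   ("has_loops", PySem.Str.isIn "LOOP" text),
   ("has_exceptions", PySem.Str.isIn "EXCEPTION" text || PySem.Str.isIn "RAISE" text),
   ("has_select", PySem.Str.isIn "SELECT" text),
   ("has_insert", PySem.Str.isIn "INSERT" text),
   ("has_update", PySem.Str.isIn "UPDATE" text),
   ("has_delete", PySem.Str.isIn "DELETE" text)]

-- ===== PRECONDITION & SPEC =====
-- Pre_ excludes statements lacking the key "raw_sql", on which A (and B) raise KeyError.
def Pre_extract_syntax_elements_py (statements : List (List (String × String))) : Prop :=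
  (statements.all (fun stmt => stmt.any (fun p => p.1 == "raw_sql"))) = true
instance (statements : List (List (String × String))) : Decidable (Pre_extract_syntax_elements_py statements) := by unfold Pre_extract_syntax_elements_py; infer_instance
def pvWitness_extract_syntax_elements_py : (List (List (String × String))) := ([[("raw_sql", "select 1")]])

def Spec_extract_syntax_elements_py (statements : List (List (String × String))) (out : List (String × Bool)) : Prop := out = extract_syntax_elements_py_alt statements
instance (statements : List (List (String × String))) (out : List (String × Bool)) : Decidable (Spec_extract_syntax_elements_py statements out) := by unfold Spec_extract_syntax_elements_py; infer_instance

-- ===== CLAIM (what is proved, stated in full; the proofs are below) =====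
def Claim_equal_extract_syntax_elements_py : Prop := ∀ (statements : List (List (String × String))), Dom_extract_syntax_elements_py statements → Pre_extract_syntax_elements_py statements → Spec_extract_syntax_elements_py statements (extract_syntax_elements_py statements)

-- ===== LEMMAS AND PROOFS =====
lemma pvIns1 (c : Bool) (b1 b2 b3 b4 b5 b6 b7 b8 : Bool) :
    (if c = true then (PySem.Dict.mk [("has_if_statements", b1), ("has_case_statements", b2), ("has_loops", b3), ("has_exceptions", b4), ("has_select", b5), ("has_insert", b6), ("has_update", b7), ("has_delete", b8)]).insert "has_if_statements" true else PySem.Dict.mk [("has_if_statements", b1), ("has_case_statements", b2), ("has_loops", b3), ("has_exceptions", b4), ("has_select", b5), ("has_insert", b6), ("has_update", b7), ("has_delete", b8)]) =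
    PySem.Dict.mk [("has_if_statements", b1 || c), ("has_case_statements", b2), ("has_loops", b3), ("has_exceptions", b4), ("has_select", b5), ("has_insert", b6), ("has_update", b7), ("has_delete", b8)] := by
  cases c <;> simp [PySem.Dict.insert]

lemma pvIns2 (c : Bool) (b1 b2 b3 b4 b5 b6 b7 b8 : Bool) :
    (if c = true then (PySem.Dict.mk [("has_if_statements", b1), ("has_case_statements", b2), ("has_loops", b3), ("has_exceptions", b4), ("has_select", b5), ("has_insert", b6), ("has_update", b7), ("has_delete", b8)]).insert "has_case_statements" true else PySem.Dict.mk [("has_if_statements", b1), ("has_case_statements", b2), ("has_loops", b3), ("has_exceptions", b4), ("has_select", b5), ("has_insert", b6), ("has_update", b7), ("has_delete", b8)]) =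
    PySem.Dict.mk [("has_if_statements", b1), ("has_case_statements", b2 || c), ("has_loops", b3), ("has_exceptions", b4), ("has_select", b5), ("has_insert", b6), ("has_update", b7), ("has_delete", b8)] := by
  cases c <;> simp [PySem.Dict.insert]

lemma pvIns3 (c : Bool) (b1 b2 b3 b4 b5 b6 b7 b8 : Bool) :
    (if c = true then (PySem.Dict.mk [("has_if_statements", b1), ("has_case_statements", b2), ("has_loops", b3), ("has_exceptions", b4), ("has_select", b5), ("has_insert", b6), ("has_update", b7), ("has_delete", b8)]).insert "has_loops" true else PySem.Dict.mk [("has_if_statements", b1), ("has_case_statements", b2), ("has_loops", b3), ("has_exceptions", b4), ("has_select", b5), ("has_insert", b6), ("has_update", b7), ("has_delete", b8)]) =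
    PySem.Dict.mk [("has_if_statements", b1), ("has_case_statements", b2), ("has_loops", b3 || c), ("has_exceptions", b4), ("has_select", b5), ("has_insert", b6), ("has_update", b7), ("has_delete", b8)] := by
  cases c <;> simp [PySem.Dict.insert]

lemma pvIns4 (c : Bool) (b1 b2 b3 b4 b5 b6 b7 b8 : Bool) :
    (if c = true then (PySem.Dict.mk [("has_if_statements", b1), ("has_case_statements", b2), ("has_loops", b3), ("has_exceptions", b4), ("has_select", b5), ("has_insert", b6), ("has_update", b7), ("has_delete", b8)]).insert "has_exceptions" true else PySem.Dict.mk [("has_if_statements", b1), ("has_case_statements", b2), ("has_loops", b3), ("has_exceptions", b4), ("has_select", b5), ("has_insert", b6), ("has_update", b7), ("has_delete", b8)]) =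
    PySem.Dict.mk [("has_if_statements", b1), ("has_case_statements", b2), ("has_loops", b3), ("has_exceptions", b4 || c), ("has_select", b5), ("has_insert", b6), ("has_update", b7), ("has_delete", b8)] := by
  cases c <;> simp [PySem.Dict.insert]

lemma pvIns5 (c : Bool) (b1 b2 b3 b4 b5 b6 b7 b8 : Bool) :
    (if c = true then (PySem.Dict.mk [("has_if_statements", b1), ("has_case_statements", b2), ("has_loops", b3), ("has_exceptions", b4), ("has_select", b5), ("has_insert", b6), ("has_update", b7), ("has_delete", b8)]).insert "has_select" true else PySem.Dict.mk [("has_if_statements", b1), ("has_case_statements", b2), ("has_loops", b3), ("has_exceptions", b4), ("has_select", b5), ("has_insert", b6), ("has_update", b7), ("has_delete", b8)]) =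
    PySem.Dict.mk [("has_if_statements", b1), ("has_case_statements", b2), ("has_loops", b3), ("has_exceptions", b4), ("has_select", b5 || c), ("has_insert", b6), ("has_update", b7), ("has_delete", b8)] := by
  cases c <;> simp [PySem.Dict.insert]

lemma pvIns6 (c : Bool) (b1 b2 b3 b4 b5 b6 b7 b8 : Bool) :
    (if c = true then (PySem.Dict.mk [("has_if_statements", b1), ("has_case_statements", b2), ("has_loops", b3), ("has_exceptions", b4), ("has_select", b5), ("has_insert", b6), ("has_update", b7), ("has_delete", b8)]).insert "has_insert" true else PySem.Dict.mk [("has_if_statements", b1), ("has_case_statements", b2), ("has_loops", b3), ("has_exceptions", b4), ("has_select", b5), ("has_insert", b6), ("has_update", b7), ("has_delete", b8)]) =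
    PySem.Dict.mk [("has_if_statements", b1), ("has_case_statements", b2), ("has_loops", b3), ("has_exceptions", b4), ("has_select", b5), ("has_insert", b6 || c), ("has_update", b7), ("has_delete", b8)] := by
  cases c <;> simp [PySem.Dict.insert]

lemma pvIns7 (c : Bool) (b1 b2 b3 b4 b5 b6 b7 b8 : Bool) :
    (if c = true then (PySem.Dict.mk [("has_if_statements", b1), ("has_case_statements", b2), ("has_loops", b3), ("has_exceptions", b4), ("has_select", b5), ("has_insert", b6), ("has_update", b7), ("has_delete", b8)]).insert "has_update" true else PySem.Dict.mk [("has_if_statements", b1), ("has_case_statements", b2), ("has_loops", b3), ("has_exceptions", b4), ("has_select", b5), ("has_insert", b6), ("has_update", b7), ("has_delete", b8)]) =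
    PySem.Dict.mk [("has_if_statements", b1), ("has_case_statements", b2), ("has_loops", b3), ("has_exceptions", b4), ("has_select", b5), ("has_insert", b6), ("has_update", b7 || c), ("has_delete", b8)] := by
  cases c <;> simp [PySem.Dict.insert]

lemma pvIns8 (c : Bool) (b1 b2 b3 b4 b5 b6 b7 b8 : Bool) :
    (if c = true then (PySem.Dict.mk [("has_if_statements", b1), ("has_case_statements", b2), ("has_loops", b3), ("has_exceptions", b4), ("has_select", b5), ("has_insert", b6), ("has_update", b7), ("has_delete", b8)]).insert "has_delete" true else PySem.Dict.mk [("has_if_statements", b1), ("has_case_statements", b2), ("has_loops", b3), ("has_exceptions", b4), ("has_select", b5), ("has_insert", b6), ("has_update", b7), ("has_delete", b8)]) =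
    PySem.Dict.mk [("has_if_statements", b1), ("has_case_statements", b2), ("has_loops", b3), ("has_exceptions", b4), ("has_select", b5), ("has_insert", b6), ("has_update", b7), ("has_delete", b8 || c)] := by
  cases c <;> simp [PySem.Dict.insert]

lemma pvStepA_mk (stmt : List (String × String)) (b1 b2 b3 b4 b5 b6 b7 b8 : Bool) :
    pvStepA (PySem.Dict.mk
      [("has_if_statements", b1), ("has_case_statements", b2), ("has_loops", b3),
       ("has_exceptions", b4), ("has_select", b5), ("has_insert", b6),
       ("has_update", b7), ("has_delete", b8)]) stmt =
    PySem.Dict.mk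
      [("has_if_statements", b1 || PySem.Str.isIn "IF " (pvUpperSql stmt)),
       ("has_case_statements", b2 || PySem.Str.isIn "CASE " (pvUpperSql stmt)),
       ("has_loops", b3 || PySem.Str.isIn "LOOP" (pvUpperSql stmt)),
       ("has_exceptions", b4 || (PySem.Str.isIn "EXCEPTION" (pvUpperSql stmt) || PySem.Str.isIn "RAISE" (pvUpperSql stmt))),
       ("has_select", b5 || PySem.Str.isIn "SELECT" (pvUpperSql stmt)),
       ("has_insert", b6 || PySem.Str.isIn "INSERT" (pvUpperSql stmt)),
       ("has_update", b7 || PySem.Str.isIn "UPDATE" (pvUpperSql stmt)),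
       ("has_delete", b8 || PySem.Str.isIn "DELETE" (pvUpperSql stmt))] := by
  simp only [pvStepA]
  rw [pvIns1, pvIns2, pvIns3, pvIns4, pvIns5, pvIns6, pvIns7, pvIns8]

lemma pvLoop (l : List (List (String × String))) (b1 b2 b3 b4 b5 b6 b7 b8 : Bool) :
    (l.foldl pvStepA (PySem.Dict.mk
      [("has_if_statements", b1), ("has_case_statements", b2), ("has_loops", b3),
       ("has_exceptions", b4), ("has_select", b5), ("has_insert", b6),
       ("has_update", b7), ("has_delete", b8)])).items =
    [("has_if_statements", b1 || l.any (fun s => PySem.Str.isIn "IF " (pvUpperSql s))),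
     ("has_case_statements", b2 || l.any (fun s => PySem.Str.isIn "CASE " (pvUpperSql s))),
     ("has_loops", b3 || l.any (fun s => PySem.Str.isIn "LOOP" (pvUpperSql s))),
     ("has_exceptions", b4 || l.any (fun s => PySem.Str.isIn "EXCEPTION" (pvUpperSql s) || PySem.Str.isIn "RAISE" (pvUpperSql s))),
     ("has_select", b5 || l.any (fun s => PySem.Str.isIn "SELECT" (pvUpperSql s))),
     ("has_insert", b6 || l.any (fun s => PySem.Str.isIn "INSERT" (pvUpperSql s))),
     ("has_update", b7 || l.any (fun s => PySem.Str.isIn "UPDATE" (pvUpperSql s))),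
     ("has_delete", b8 || l.any (fun s => PySem.Str.isIn "DELETE" (pvUpperSql s)))] := by
  induction l generalizing b1 b2 b3 b4 b5 b6 b7 b8 with
  | nil => simp
  | cons x xs ih =>
    rw [List.foldl_cons, pvStepA_mk, ih]
    simp only [List.any_cons, Bool.or_assoc]

-- a prefix not containing c cannot reach past the separator
lemma pvPrefix_sep {l a b : List Char} {c : Char} (hc : c ∉ l) :
    l <+: a ++ c :: b ↔ l <+: a := by
  constructor
  · intro h
    rcases Nat.lt_or_ge a.length l.length with hlt | hle
    · exfalso
      apply hc
      rw [List.prefix_iff_eq_take] at h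
      have h1 : ((a ++ c :: b).take l.length)[a.length]'(by
          simp [List.length_take]; omega) = c := by
        rw [List.getElem_take, List.getElem_append_right (Nat.le_refl _)]
        simp
      have hm : ((a ++ c :: b).take l.length)[a.length]'(by
          simp [List.length_take]; omega) ∈ (a ++ c :: b).take l.length :=
        List.getElem_mem _
      rw [h1] at hm
      rw [h]
      exact hm
    · rw [List.prefix_iff_eq_take] at h ⊢
      rw [h, List.take_append_of_le_length hle]
      simp [List.length_take, hle]
  · intro h
    exact h.trans (List.prefix_append a (c :: b))

-- an infix not containing c lies entirely on one side of the separator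
lemma pvInfix_sep {l : List Char} {c : Char} (hc : c ∉ l) (a b : List Char) :
    l <:+: a ++ c :: b ↔ l <:+: a ∨ l <:+: b := by
  induction a with
  | nil =>
    simp only [List.nil_append, List.infix_cons_iff, List.infix_nil]
    constructor
    · rintro (h | h)
      · left
        rcases l with _ | ⟨x, xs⟩
        · rfl
        · exfalso; apply hc
          obtain ⟨t, ht⟩ := h
          simp only [List.cons_append, List.cons.injEq] at ht
          simp [ht.1]
      · right; exact h
    · rintro (h | h)
      · subst h; left; exact List.nil_prefix
      · right; exact h
  | cons x a' ih =>
    rw [List.cons_append, List.infix_cons_iff, List.infix_cons_iff, ih,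
        show x :: (a' ++ c :: b) = (x :: a') ++ c :: b from rfl, pvPrefix_sep hc]
    tauto

-- a keyword without the separator char is in the joined text iff it is in some segment
lemma pvJoin_isIn (kw : List Char) (c : Char) (hc : c ∉ kw) (hne : kw ≠ [])
    (segs : List (List Char)) :
    PySem.Chars.isIn kw (PySem.Chars.join [c] segs) = segs.any (fun s => PySem.Chars.isIn kw s) := by
  induction segs with
  | nil =>
    rw [PySem.Chars.join_nil]
    simp only [List.any_nil]
    rw [PySem.Chars.isIn_eq_false_iff, List.infix_nil]
    exact hne
  | cons x xs ih =>
    cases xs with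
    | nil => simp [PySem.Chars.join, List.intercalate]
    | cons y r =>
      rw [PySem.Chars.join_cons_cons]
      rw [Bool.eq_iff_iff]
      rw [PySem.Chars.isIn_iff_infix]
      rw [show x ++ [c] ++ PySem.Chars.join [c] (y :: r) = x ++ c :: PySem.Chars.join [c] (y :: r) by simp]
      rw [pvInfix_sep hc]
      rw [← PySem.Chars.isIn_iff_infix, ← PySem.Chars.isIn_iff_infix, ih]
      simp [List.any_cons]

-- lift to String level, over the mapped statements
lemma pvJoin_str (kw : String) (hc : '\n' ∉ kw.toList) (hne : kw.toList ≠ [])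
    (l : List (List (String × String))) :
    PySem.Str.isIn kw (PySem.Str.join "\n" (l.map pvUpperSql)) =
      l.any (fun s => PySem.Str.isIn kw (pvUpperSql s)) := by
  rw [PySem.Str.isIn_eq, PySem.Str.toList_join]
  rw [show ("\n" : String).toList = ['\n'] from rfl]
  rw [pvJoin_isIn kw.toList '\n' hc hne]
  simp [List.map_map, List.any_map, Function.comp_def, PySem.Str.isIn_eq]

-- ===== VERDICT (by name: the statement is the Claim_ definition above) =====
theorem extract_syntax_elements_py_spec : Claim_equal_extract_syntax_elements_py := by
  intro statements _ _
  unfold Spec_extract_syntax_elements_py extract_syntax_elements_py extract_syntax_elements_py_alt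
  rw [pvLoop]
  simp only [Bool.false_or]
  rw [pvJoin_str "IF " (by decide) (by decide),
      pvJoin_str "CASE " (by decide) (by decide),
      pvJoin_str "LOOP" (by decide) (by decide),
      pvJoin_str "EXCEPTION" (by decide) (by decide),
      pvJoin_str "RAISE" (by decide) (by decide),
      pvJoin_str "SELECT" (by decide) (by decide),
      pvJoin_str "INSERT" (by decide) (by decide),
      pvJoin_str "UPDATE" (by decide) (by decide),
      pvJoin_str "DELETE" (by decide) (by decide)]
  have hor : ∀ (l : List (List (String × String))) (p q : List (String × String) → Bool),
      (l.any fun s => p s || q s) = (l.any p || l.any q) := by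
    intro l p q
    induction l with
    | nil => simp
    | cons x xs ih => cases hp : p x <;> cases hq : q x <;> simp [List.any_cons, hp, hq, ih]
  rw [hor]
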